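-- pv_equiv track=rewrite | github.com/yonsweng/ps | codeforces/1617/a.py | solve
-- ===== SOURCE A (Python) =====
-- from string import ascii_lowercase
--
-- def solve(S, T):
--     answer = 0
--
--     if T == 'abc':
--         others = []
--         for alphabet in ascii_lowercase:
--             if alphabet != 'a' and alphabet != 'b' and alphabet != 'c':
--                 others.append(alphabet * S.count(alphabet))
--         others = ''.join(others)
--         if S.count('a') > 0:
--             answer = S.count('a') * 'a' + S.count('c') * 'c' + S.count('b') * 'b' + others
--         else:
--             answer = S.count('b') * 'b' + S.count('c') * 'c' + others
--     else:
--         answer = [S.count(alphabet) * alphabet for alphabet in ascii_lowercase]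
--         answer = ''.join(answer)
--
--     return answer
-- ===== SOURCE B (Python) =====
-- from string import ascii_lowercase
--
--
-- def solve(S, T):
--     letters = [c for c in S if c in ascii_lowercase]
--     if T == 'abc' and 'a' in S:
--         # place letters in the order a < c < b < d < e < ... by swapping b and c
--         swap = {'b': 'c', 'c': 'b'}
--         return ''.join(sorted(letters, key=lambda ch: swap.get(ch, ch)))
--     return ''.join(sorted(letters))
-- ===== Notes on version B (the rewrite author's own statement) =====
-- stated objective: simpler
-- what changed: Replaces A's 26-pass counting-and-concatenation (one S.count per letter plus hand-ordered a/c/b blocks) with a single filter of S's lowercase letters and one comparison sort, using a swap-b-and-c key when T=='abc' and 'a' occurs in S.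
import Mathlib
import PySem

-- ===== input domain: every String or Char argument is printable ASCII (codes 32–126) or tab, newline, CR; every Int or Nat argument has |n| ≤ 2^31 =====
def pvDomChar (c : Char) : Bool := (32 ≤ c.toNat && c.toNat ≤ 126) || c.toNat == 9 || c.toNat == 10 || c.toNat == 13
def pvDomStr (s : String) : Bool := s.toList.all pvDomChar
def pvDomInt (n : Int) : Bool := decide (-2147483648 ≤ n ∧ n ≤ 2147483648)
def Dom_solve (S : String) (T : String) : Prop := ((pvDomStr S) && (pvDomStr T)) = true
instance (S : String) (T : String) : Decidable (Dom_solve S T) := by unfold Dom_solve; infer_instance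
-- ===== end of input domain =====

-- B replaces A's per-letter counting-and-concatenation with one comparison sort of S's
-- lowercase letters under a swap-b-and-c key (objective: simpler).

-- from string import ascii_lowercase
def asciiLowercase : List Char :=
  ['a','b','c','d','e','f','g','h','i','j','k','l','m','n','o','p','q','r','s','t','u','v','w','x','y','z']

-- ===== PORT A =====
-- strings are handled as their List Char contents; ''.join(list of strings) with the empty
-- separator is exactly List.flatten, and 'alphabet * n' (a 1-char string repeated) is
-- exactly List.replicate n alphabet.
def solve (S : String) (T : String) : String :=
  if T == "abc" then
    let others : List (List Char) :=
      asciiLowercase.foldl (fun acc c =>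
        if c ≠ 'a' ∧ c ≠ 'b' ∧ c ≠ 'c' then
          acc ++ [List.replicate (PySem.Str.count S (String.singleton c)) c]
        else acc) []
    let othersJ : List Char := others.flatten
    if PySem.Str.count S "a" > 0 then
      String.ofList (List.replicate (PySem.Str.count S "a") 'a' ++
                 List.replicate (PySem.Str.count S "c") 'c' ++
                 List.replicate (PySem.Str.count S "b") 'b' ++ othersJ)
    else
      String.ofList (List.replicate (PySem.Str.count S "b") 'b' ++
                 List.replicate (PySem.Str.count S "c") 'c' ++ othersJ)
  else
    String.ofList ((asciiLowercase.map
      (fun c => List.replicate (PySem.Str.count S (String.singleton c)) c)).flatten)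

-- ===== PORT B =====
-- 'c in ascii_lowercase' on a single character is membership in the 26 letters (exact);
-- the dict {'b':'c','c':'b'} with .get(ch, ch) is the sort key.
def solve_alt (S : String) (T : String) : String :=
  if T == "abc" && PySem.Str.isIn "a" S then
    String.ofList (PySem.List.sorted (S.toList.filter (fun c => decide (c ∈ asciiLowercase)))
      (fun ch => (((PySem.Dict.empty.insert 'b' 'c').insert 'c' 'b' : PySem.Dict Char Char).getD ch ch)) false)
  else
    String.ofList (PySem.List.sorted (S.toList.filter (fun c => decide (c ∈ asciiLowercase)))
      (fun ch => ch) false)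

-- ===== PRECONDITION & SPEC =====
def Spec_solve (S : String) (T : String) (out : String) : Prop := out = solve_alt S T
instance (S : String) (T : String) (out : String) : Decidable (Spec_solve S T out) := by unfold Spec_solve; infer_instance

-- ===== CLAIM (what is proved, stated in full; the proofs are below) =====
def Claim_equal_solve : Prop := ∀ (S : String) (T : String), Dom_solve S T → Spec_solve S T (solve S T)

-- ===== LEMMAS AND PROOFS =====

-- s.count(ch) for a single character is the character count.
lemma count_go_singleton (c : Char) : ∀ (l : List Char) (fuel acc : Nat), l.length ≤ fuel →
    PySem.Chars.count.go [c] fuel l acc = acc + l.count c := by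
  intro l
  induction l with
  | nil => intro fuel acc _; cases fuel <;> simp [PySem.Chars.count.go]
  | cons h t ih =>
    intro fuel acc hle
    cases fuel with
    | zero => simp at hle
    | succ f =>
      have ht : t.length ≤ f := by simpa using hle
      have hstep : PySem.Chars.count.go [c] (f + 1) (h :: t) acc
          = if (c == h) = true then PySem.Chars.count.go [c] f t (acc + 1)
            else PySem.Chars.count.go [c] f t acc := by
        simp [PySem.Chars.count.go, List.isPrefixOf]
      rw [hstep]
      by_cases hc : c = h
      · subst hc
        simp only [beq_self_eq_true, if_pos, ih f (acc + 1) ht, List.count_cons]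
        omega
      · have hb : (c == h) = false := by simp [hc]
        rw [hb]
        simp only [Bool.false_eq_true, if_false, ih f acc ht, List.count_cons]
        have : (h == c) = false := by simp [Ne.symm hc]
        simp [this]

lemma chars_count_single (l : List Char) (c : Char) : PySem.Chars.count l [c] = l.count c := by
  have : PySem.Chars.count l [c] = PySem.Chars.count.go [c] l.length l 0 := by
    simp [PySem.Chars.count]
  rw [this, count_go_singleton c l l.length 0 le_rfl]
  exact Nat.zero_add _

lemma str_count_single (S : String) (c : Char) :
    PySem.Str.count S (String.singleton c) = S.toList.count c := by
  rw [PySem.Str.count_eq]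
  have h : (String.singleton c).toList = [c] := by simp
  rw [h, chars_count_single]

lemma str_count_a (S : String) : PySem.Str.count S "a" = S.toList.count 'a' := by
  have : ("a" : String) = String.singleton 'a' := rfl
  rw [this, str_count_single]

lemma str_count_b (S : String) : PySem.Str.count S "b" = S.toList.count 'b' := by
  have : ("b" : String) = String.singleton 'b' := rfl
  rw [this, str_count_single]

lemma str_count_c (S : String) : PySem.Str.count S "c" = S.toList.count 'c' := by
  have : ("c" : String) = String.singleton 'c' := rfl
  rw [this, str_count_single]

-- '"a" in S' is membership of 'a' in S's characters.
lemma isIn_a_iff (S : String) : PySem.Str.isIn "a" S = true ↔ 'a' ∈ S.toList := by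
  rw [PySem.Str.isIn_iff_infix]
  constructor
  · intro h
    exact List.singleton_sublist.mp h.sublist
  · intro h
    obtain ⟨s, t, he⟩ := List.append_of_mem h
    exact ⟨s, t, by rw [he]; simp⟩

-- the count of a letter in the concatenation of per-letter replicate blocks
lemma count_repFlat (f : Char → Nat) (a : Char) :
    ∀ (L : List Char), L.Nodup →
      ((L.map fun c => List.replicate (f c) c).flatten).count a = if a ∈ L then f a else 0 := by
  intro L
  induction L with
  | nil => intro _; simp
  | cons c L' ih =>
    intro hN
    rcases List.nodup_cons.mp hN with ⟨hc, hN'⟩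
    simp only [List.map_cons, List.flatten_cons, List.count_append, List.count_replicate,
      ih hN', List.mem_cons]
    by_cases hac : a = c
    · subst hac
      simp [hc]
    · have : (c == a) = false := by simp [Ne.symm hac]
      simp [this, hac]

-- the replicate blocks are, as a multiset, the letters of l that lie in L
lemma repFlat_perm (L l : List Char) (hN : L.Nodup) :
    ((L.map fun c => List.replicate (l.count c) c).flatten).Perm
      (l.filter fun x => decide (x ∈ L)) := by
  rw [List.perm_iff_count]
  intro a
  rw [count_repFlat (fun c => l.count c) a L hN]
  by_cases ha : a ∈ L
  · rw [List.count_filter (by simpa using ha)]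
    simp [ha]
  · simp only [ha, if_false]
    refine (List.count_eq_zero.mpr ?_).symm
    intro hmem
    exact ha (by simpa using List.of_mem_filter hmem)

lemma repFlat_pairwise (key : Char → Char) (f : Char → Nat) (L : List Char)
    (hpw : L.Pairwise fun a b => key a ≤ key b) :
    ((L.map fun c => List.replicate (f c) c).flatten).Pairwise fun a b => key a ≤ key b := by
  rw [List.pairwise_flatten]
  constructor
  · intro l' hl'
    simp only [List.mem_map] at hl'
    obtain ⟨c, _, rfl⟩ := hl'
    exact List.pairwise_replicate.mpr (Or.inr le_rfl)
  · rw [List.pairwise_map]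
    refine hpw.imp ?_
    intro a b h x hx y hy
    rw [List.eq_of_mem_replicate hx, List.eq_of_mem_replicate hy]
    exact h

-- a comparison sort under an injective key equals the counting-sort concatenation
lemma sorted_eq_repFlat (key : Char → Char) (hinj : Function.Injective key)
    (L l : List Char) (hN : L.Nodup) (hpw : L.Pairwise fun a b => key a ≤ key b) :
    PySem.List.sorted (l.filter fun x => decide (x ∈ L)) key false
      = (L.map fun c => List.replicate (l.count c) c).flatten := by
  apply PySem.List.eq_of_perm_of_pairwise_le_of_injective key hinj
  · exact (PySem.List.sorted_perm _ _ _).trans (repFlat_perm L l hN).symm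
  · exact PySem.List.sorted_pairwise _ _
  · exact repFlat_pairwise key _ L hpw

-- the swap-b-and-c sort key, evaluated
lemma swapKey_eval (ch : Char) :
    (((PySem.Dict.empty.insert 'b' 'c').insert 'c' 'b' : PySem.Dict Char Char).getD ch ch)
      = if ch = 'c' then 'b' else if ch = 'b' then 'c' else ch := by
  rw [PySem.Dict.getD_insert, PySem.Dict.getD_insert, PySem.Dict.getD_empty]

lemma swapKey_invol (ch : Char) :
    (((PySem.Dict.empty.insert 'b' 'c').insert 'c' 'b' : PySem.Dict Char Char).getD
      ((((PySem.Dict.empty.insert 'b' 'c').insert 'c' 'b' : PySem.Dict Char Char).getD ch ch))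
      ((((PySem.Dict.empty.insert 'b' 'c').insert 'c' 'b' : PySem.Dict Char Char).getD ch ch))) = ch := by
  simp only [swapKey_eval]
  by_cases h1 : ch = 'c'
  · simp [h1]
  · by_cases h2 : ch = 'b'
    · simp [h2]
    · simp [h1, h2]

lemma swapKey_inj :
    Function.Injective (fun ch =>
      (((PySem.Dict.empty.insert 'b' 'c').insert 'c' 'b' : PySem.Dict Char Char).getD ch ch)) := by
  intro x y h
  have hx := swapKey_invol x
  have hy := swapKey_invol y
  simp only at h
  rw [← hx, ← hy, h]

-- the letter orders A's concatenation realises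
def orderWithA : List Char :=
  'a' :: 'c' :: 'b' :: (asciiLowercase.filter (fun c => decide (c ≠ 'a' ∧ c ≠ 'b' ∧ c ≠ 'c')))

def orderNoA : List Char :=
  'b' :: 'c' :: (asciiLowercase.filter (fun c => decide (c ≠ 'a' ∧ c ≠ 'b' ∧ c ≠ 'c')))

theorem solve_spec : Claim_equal_solve := by
  intro S T _
  unfold Spec_solve
  simp only [solve, solve_alt]
  by_cases hT : (T == "abc") = true
  · simp only [hT, if_pos, Bool.true_and]
    by_cases hA : 'a' ∈ S.toList
    · have hcnt : PySem.Str.count S "a" > 0 := by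
        rw [str_count_a]; exact List.count_pos_iff.mpr hA
      have hin : PySem.Str.isIn "a" S = true := (isIn_a_iff S).mpr hA
      rw [if_pos hcnt, if_pos hin]
      apply congrArg String.ofList
      have hfil : (S.toList.filter fun c => decide (c ∈ asciiLowercase))
          = S.toList.filter fun x => decide (x ∈ orderWithA) := by
        apply List.filter_congr
        intro x _
        have hperm : orderWithA.Perm asciiLowercase := by decide
        simp [hperm.mem_iff]
      rw [hfil,
        sorted_eq_repFlat _ swapKey_inj orderWithA S.toList (by decide) (by decide)]
      rw [PySem.List.foldl_append_ite (p := fun c => c ≠ 'a' ∧ c ≠ 'b' ∧ c ≠ 'c')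
        (f := fun c => List.replicate (PySem.Str.count S (String.singleton c)) c)]
      simp only [orderWithA, List.map_cons, List.flatten_cons, List.nil_append,
        str_count_a, str_count_b, str_count_c, str_count_single, List.append_assoc]
    · have hcnt : ¬ (PySem.Str.count S "a" > 0) := by
        rw [str_count_a]
        simpa using fun h => hA (List.count_pos_iff.mp h)
      have hin : PySem.Str.isIn "a" S = false := by
        rcases h : PySem.Str.isIn "a" S
        · rfl
        · exact absurd ((isIn_a_iff S).mp h) hA
      rw [if_neg hcnt, hin, if_neg (by simp)]
      apply congrArg String.ofList
      have hfil : (S.toList.filter fun c => decide (c ∈ asciiLowercase))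
          = S.toList.filter fun x => decide (x ∈ orderNoA) := by
        apply List.filter_congr
        intro x hx
        have hxa : x ≠ 'a' := fun h => hA (h ▸ hx)
        have hperm : asciiLowercase.Perm ('a' :: orderNoA) := by decide
        simp [hperm.mem_iff, hxa]
      rw [hfil,
        sorted_eq_repFlat (fun ch => ch) (fun _ _ h => h) orderNoA S.toList (by decide) (by decide)]
      rw [PySem.List.foldl_append_ite (p := fun c => c ≠ 'a' ∧ c ≠ 'b' ∧ c ≠ 'c')
        (f := fun c => List.replicate (PySem.Str.count S (String.singleton c)) c)]
      simp only [orderNoA, List.map_cons, List.flatten_cons, List.nil_append,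
        str_count_b, str_count_c, str_count_single, List.append_assoc]
  · have hTf : (T == "abc") = false := by simpa using hT
    rw [if_neg hT, hTf]
    simp only [Bool.false_and]
    rw [if_neg (by simp : ¬ (false = true))]
    apply congrArg String.ofList
    rw [sorted_eq_repFlat (fun ch => ch) (fun _ _ h => h) asciiLowercase S.toList
      (by decide) (by decide)]
    simp only [str_count_single]
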